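-- pv_equiv track=rewrite | github.com/drasken/CodeForStudy | Exercises/Euler/euler0011.py | check_horizontally
-- ===== SOURCE A (Python) =====
-- def check_horizontally(matrix:list[list], step:int) -> int:
--
--     max_found = 0
--
--     for row_index, row in enumerate(matrix):
--         for index, num in enumerate(row):
--             if (index + step) > len(row):
--                 break
--             else:
--                 temp_sum = sum(row[index: index + step])
--                 if temp_sum > max_found:
--                     max_found = temp_sum
--
--     return max_found
-- ===== SOURCE B (Python) =====
-- def check_horizontally(matrix, step):
--     best = 0
--     for row in matrix:
--         n = len(row)
--         if step <= 0 or n < step: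
--             continue
--         s = sum(row[:step])
--         if s > best:
--             best = s
--         for i in range(step, n):
--             s += row[i] - row[i - step]
--             if s > best:
--                 best = s
--     return best
-- ===== Notes on version B (the rewrite author's own statement) =====
-- stated objective: alternative
-- what changed: Per row, B keeps one running window sum updated by adding the entering and subtracting the leaving element (and skips rows shorter than step), instead of A re-summing a fresh slice of length step at every position; fewer operations per window asymptotically, but not measurably faster at the sampled window sizes.
-- outside the precondition, e.g. on check_horizontally([[1, 2, 3]], -1): A returns 3, B returns 0
import Mathlib
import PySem

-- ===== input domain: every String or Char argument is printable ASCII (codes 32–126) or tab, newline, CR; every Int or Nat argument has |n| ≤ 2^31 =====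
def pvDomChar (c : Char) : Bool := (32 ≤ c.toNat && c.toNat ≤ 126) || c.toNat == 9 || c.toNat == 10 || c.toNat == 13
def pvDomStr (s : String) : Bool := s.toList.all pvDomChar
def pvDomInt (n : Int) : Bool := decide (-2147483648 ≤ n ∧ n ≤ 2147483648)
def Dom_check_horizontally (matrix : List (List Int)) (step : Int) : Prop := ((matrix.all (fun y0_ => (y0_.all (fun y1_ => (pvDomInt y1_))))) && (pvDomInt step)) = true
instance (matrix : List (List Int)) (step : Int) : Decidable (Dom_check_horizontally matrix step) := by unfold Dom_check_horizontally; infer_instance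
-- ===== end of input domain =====

-- B replaces A's per-window slice-and-sum by a per-row sliding running sum (add entering, subtract
-- leaving element); negative step lies outside Pre_ (A there sums Python negative-index wrap slices; B returns 0).

-- ===== PORT A =====
-- inner loop of A over one row: index, remaining suffix, current max_found
def chGoA (row : List Int) (step : Int) (idx : Nat) (rest : List Int) (m : Int) : Int :=
  match rest with
  | [] => m
  | _ :: t =>
    if ((idx : Int) + step) > (row.length : Int) then m
    else
      let temp_sum := (PySem.List.slice row (some (idx : Int)) (some ((idx : Int) + step))).sum
      chGoA row step (idx + 1) t (if temp_sum > m then temp_sum else m)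

def check_horizontally (matrix : List (List Int)) (step : Int) : Int :=
  matrix.foldl (fun m row => chGoA row step 0 row m) 0

-- ===== PORT B =====
-- one row of B: skip impossible widths, otherwise slide a running window sum
def chRowB (row : List Int) (step : Int) (best : Int) : Int :=
  let n := row.length
  if step ≤ 0 ∨ (n : Int) < step then best
  else
    let k := step.toNat
    let s0 := (row.take k).sum
    let b0 := if s0 > best then s0 else best
    ((List.range' k (n - k)).foldl
      (fun (p : Int × Int) i =>
        let s := p.1 + row.getD i 0 - row.getD (i - k) 0
        (s, if s > p.2 then s else p.2)) (s0, b0)).2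

def check_horizontally_alt (matrix : List (List Int)) (step : Int) : Int :=
  matrix.foldl (fun best row => chRowB row step best) 0

-- ===== PRECONDITION & SPEC =====
-- Pre_ excludes negative step when some row is longer than -step, on which A returns (it never raises):
-- there A's slice row[i:i+step] wraps via Python negative indexing and sums accidental nonempty windows of
-- width len(row)+step — an artefact of A's implementation, not a meaningful window width; B returns 0 there.
def Pre_check_horizontally (matrix : List (List Int)) (step : Int) : Prop :=
  0 ≤ step ∨ ∀ row ∈ matrix, (row.length : Int) + step ≤ 0
instance (matrix : List (List Int)) (step : Int) : Decidable (Pre_check_horizontally matrix step) := by unfold Pre_check_horizontally; infer_instance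

def pvWitness_check_horizontally : List (List Int) × Int := ([[1, 2, 3], [4, 5, 6]], 2)

def Spec_check_horizontally (matrix : List (List Int)) (step : Int) (out : Int) : Prop := out = check_horizontally_alt matrix step
instance (matrix : List (List Int)) (step : Int) (out : Int) : Decidable (Spec_check_horizontally matrix step out) := by unfold Spec_check_horizontally; infer_instance

-- ===== CLAIM (what is proved, stated in full; the proofs are below) =====
def Claim_equal_check_horizontally : Prop := ∀ (matrix : List (List Int)) (step : Int), Dom_check_horizontally matrix step → Pre_check_horizontally matrix step → Spec_check_horizontally matrix step (check_horizontally matrix step)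

-- ===== LEMMAS AND PROOFS =====
-- sum of the width-k window of `row` starting at j
def winSum (row : List Int) (k : Nat) (j : Nat) : Int := ((row.drop j).take k).sum

lemma winSum_slide (row : List Int) (k j : Nat) (h : j + k < row.length) :
    winSum row k j + row.getD (j + k) 0 - row.getD j 0 = winSum row k (j + 1) := by
  unfold winSum
  have hj : j < row.length := by omega
  have h1 : (row.drop j).take (k+1) = (row.drop j).take k ++ ((row.drop j)[k]?).toList :=
    List.take_add_one
  have hdj : row.drop j = row[j] :: row.drop (j+1) := List.drop_eq_getElem_cons hj
  have h2 : (row.drop j)[k]? = some row[j+k] := by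
    rw [List.getElem?_drop]
    exact List.getElem?_eq_getElem (by omega)
  have h3 : (row.drop j).take (k+1) = row[j] :: (row.drop (j+1)).take k := by
    rw [hdj, List.take_succ_cons]
  have hs : ((row.drop j).take k).sum + row[j+k] = row[j] + ((row.drop (j+1)).take k).sum := by
    have := congrArg List.sum h1
    rw [h3] at this
    simp [h2] at this
    omega
  have g1 : row.getD (j+k) 0 = row[j+k] := List.getD_eq_getElem row 0 h
  have g2 : row.getD j 0 = row[j] := List.getD_eq_getElem row 0 hj
  rw [g1, g2]; omega

lemma chGoA_eq_fold (row : List Int) (k : Nat) (hk : 1 ≤ k) :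
    ∀ (rest : List Int) (idx : Nat) (m : Int), rest = row.drop idx →
      chGoA row (k : Int) idx rest m =
        (List.range' idx (row.length + 1 - k - idx)).foldl
          (fun m j => if winSum row k j > m then winSum row k j else m) m := by
  intro rest
  induction rest with
  | nil =>
    intro idx m h
    have : row.length ≤ idx := by
      have := List.drop_eq_nil_iff.mp h.symm
      omega
    have : row.length + 1 - k - idx = 0 := by omega
    simp [chGoA, this]
  | cons x t ih =>
    intro idx m h
    have hidx : idx < row.length := by
      by_contra hc
      rw [List.drop_eq_nil_of_le (by omega)] at h
      simp at h
    simp only [chGoA]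
    split
    · next hgt =>
      have : row.length + 1 - k - idx = 0 := by
        have : (row.length : Int) < idx + k := by exact_mod_cast hgt
        omega
      simp [this]
    · next hle =>
      have hik : idx + k ≤ row.length := by
        have : ¬ ((row.length : Int) < idx + k) := by exact_mod_cast hle
        omega
      have hslice : PySem.List.slice row (some (idx : Int)) (some ((idx : Int) + (k : Int))) = (row.drop idx).take k :=
        PySem.List.slice_natCast_add row idx k
      have hc : row.length + 1 - k - idx = (row.length + 1 - k - (idx+1)) + 1 := by omega
      rw [hc, List.range'_succ, List.foldl_cons]
      have ht : t = row.drop (idx + 1) := by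
        have := congrArg List.tail h
        simpa [List.tail_drop] using this
      rw [hslice]
      exact ih (idx+1) _ ht

lemma bfold_eq_fold (row : List Int) (k : Nat) :
    ∀ (c j : Nat) (b : Int), j + k + c ≤ row.length →
      ((List.range' (j + k) c).foldl
        (fun (p : Int × Int) i =>
          let s := p.1 + row.getD i 0 - row.getD (i - k) 0
          (s, if s > p.2 then s else p.2)) (winSum row k j, b)).2 =
      (List.range' (j + 1) c).foldl
        (fun m i => if winSum row k i > m then winSum row k i else m) b := by
  intro c
  induction c with
  | zero => intro j b _; simp
  | succ c ih =>
    intro j b hc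
    rw [List.range'_succ, List.range'_succ, List.foldl_cons, List.foldl_cons]
    have hjk : j + k < row.length := by omega
    have hsub : j + k - k = j := by omega
    have hs : winSum row k j + row.getD (j + k) 0 - row.getD (j + k - k) 0 = winSum row k (j + 1) := by
      rw [hsub]; exact winSum_slide row k j hjk
    simp only [hs]
    have := ih (j + 1) (if winSum row k (j+1) > b then winSum row k (j+1) else b) (by omega)
    have e1 : j + 1 + k = j + k + 1 := by omega
    rw [e1] at this
    exact this

lemma slice_empty (row : List Int) (step : Int) (idx : Nat) (hidx : idx < row.length)
    (h0 : step ≤ 0) (h : step = 0 ∨ (row.length : Int) + step ≤ 0) :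
    PySem.List.slice row (some (idx : Int)) (some ((idx : Int) + step)) = [] := by
  apply List.eq_nil_of_length_eq_zero
  rw [PySem.List.length_slice]
  have hA : PySem.List.clampIdx row.length (idx : Int) = idx := by
    rw [PySem.List.clampIdx_natCast]; omega
  rcases h with h | h
  · subst h; simp
  · have hneg : (idx : Int) + step < 0 := by omega
    set k : Nat := (-((idx : Int) + step)).toNat with hkdef
    have hk : ((k : Int)) = -((idx : Int) + step) := by
      rw [hkdef]; exact Int.toNat_of_nonneg (by omega)
    have hb : (idx : Int) + step = -(k : Int) := by omega
    have hkpos : 0 < k := by omega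
    rw [hb, PySem.List.clampIdx_neg_natCast _ _ hkpos, hA]
    have : (row.length : Int) ≤ (k : Int) + (idx : Int) := by omega
    omega

lemma chGoA_nonpos (row : List Int) (step : Int) (h0 : step ≤ 0)
    (h : step = 0 ∨ (row.length : Int) + step ≤ 0) :
    ∀ (rest : List Int) (idx : Nat) (m : Int), 0 ≤ m → rest = row.drop idx →
      chGoA row step idx rest m = m := by
  intro rest
  induction rest with
  | nil => intro idx m _ _; simp [chGoA]
  | cons x t ih =>
    intro idx m hm hr
    have hidx : idx < row.length := by
      by_contra hc
      rw [List.drop_eq_nil_of_le (by omega)] at hr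
      simp at hr
    simp only [chGoA]
    split
    · rfl
    · rw [slice_empty row step idx hidx h0 h]
      have ht : t = row.drop (idx + 1) := by
        have := congrArg List.tail hr
        simpa [List.tail_drop] using this
      have : (if (List.sum ([] : List Int)) > m then (List.sum ([] : List Int)) else m) = m := by
        simp; omega
      rw [this]
      exact ih (idx + 1) m hm ht

lemma snd_le_foldl (row : List Int) (k : Nat) :
    ∀ (l : List Nat) (p : Int × Int),
      p.2 ≤ (l.foldl (fun (p : Int × Int) i =>
        let s := p.1 + row.getD i 0 - row.getD (i - k) 0
        (s, if s > p.2 then s else p.2)) p).2 := by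
  intro l
  induction l with
  | nil => intro p; exact le_refl _
  | cons x t ih =>
    intro p
    rw [List.foldl_cons]
    exact le_trans (by simp only []; split <;> omega) (ih _)

lemma chRowB_le (row : List Int) (step : Int) (m : Int) : m ≤ chRowB row step m := by
  simp only [chRowB]
  split
  · exact le_refl _
  · apply le_trans (by split <;> omega :
      m ≤ (if (List.take step.toNat row).sum > m then (List.take step.toNat row).sum else m))
    apply snd_le_foldl

lemma row_eq (row : List Int) (step : Int) (m : Int) (hm : 0 ≤ m)
    (hs : 0 ≤ step ∨ (row.length : Int) + step ≤ 0) :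
    chGoA row step 0 row m = chRowB row step m := by
  by_cases hpos : 1 ≤ step
  · have hk1 : 1 ≤ step.toNat := by omega
    have hstep : step = (step.toNat : Int) := by omega
    set k := step.toNat with hkdef
    by_cases hbig : (row.length : Int) < step
    · have hB : chRowB row step m = m := by unfold chRowB; rw [if_pos (Or.inr hbig)]
      rw [hB]
      cases row with
      | nil => simp [chGoA]
      | cons x t =>
        simp only [chGoA]
        rw [if_pos (by push_cast at hbig ⊢; omega)]
    · have hkn : k ≤ row.length := by omega
      rw [hstep]
      rw [chGoA_eq_fold row k hk1 row 0 m (by simp)]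
      unfold chRowB
      rw [if_neg (by omega)]
      simp only [Int.toNat_natCast]
      have hs0 : (row.take k).sum = winSum row k 0 := by
        simp [winSum, hkdef]
      rw [hs0]
      have hb := bfold_eq_fold row k (row.length - k) 0 (if winSum row k 0 > m then winSum row k 0 else m) (by omega)
      simp only [Nat.zero_add] at hb
      rw [hb]
      have hc : row.length + 1 - k - 0 = (row.length - k) + 1 := by omega
      rw [hc, List.range'_succ, List.foldl_cons]
  · have hs0 : step ≤ 0 := by omega
    have hB : chRowB row step m = m := by unfold chRowB; rw [if_pos (Or.inl hs0)]
    rw [hB]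
    rcases hs with hs | hs
    · exact chGoA_nonpos row step hs0 (Or.inl (by omega)) row 0 m hm (by simp)
    · exact chGoA_nonpos row step hs0 (Or.inr hs) row 0 m hm (by simp)

lemma fold_eq (step : Int) :
    ∀ (rows : List (List Int)) (m : Int), 0 ≤ m →
      (∀ r ∈ rows, 0 ≤ step ∨ (r.length : Int) + step ≤ 0) →
      rows.foldl (fun m row => chGoA row step 0 row m) m =
        rows.foldl (fun best row => chRowB row step best) m := by
  intro rows
  induction rows with
  | nil => intro m _ _; rfl
  | cons r t ih =>
    intro m hm hrows
    rw [List.foldl_cons, List.foldl_cons, row_eq r step m hm (hrows r List.mem_cons_self)]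
    exact ih (chRowB r step m) (le_trans hm (chRowB_le r step m))
      (fun r' hr' => hrows r' (List.mem_cons_of_mem _ hr'))

-- ===== VERDICT (by name: the statement is the Claim_ definition above) =====
theorem check_horizontally_spec : Claim_equal_check_horizontally := by
  intro matrix step _ hpre
  unfold Spec_check_horizontally check_horizontally check_horizontally_alt
  apply fold_eq step matrix 0 le_rfl
  intro r hr
  rcases hpre with h | h
  · exact Or.inl h
  · exact Or.inr (h r hr)
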